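-- pv_equiv track=rewrite | github.com/F1uctus/ttc | ttc/iterables.py | iter_by_abs_idx
-- ===== SOURCE A (Python) =====
-- from typing import Iterable, TypeVar, Optional, List, Tuple
--
-- T = TypeVar("T")
--
-- def iter_by_abs_idx(seq: List[T], start: int) -> Iterable[Tuple[T, int]]:
--     """
--     Iterates over a sequence of elements with their indices following the
--     canonical enumeration of integers (e.g. 0 1 -1 2 -2 3 -3 ...).
--
--     Parameters
--     ----------
--     seq
--         A sequence to iterate over.
--     start
--         An index to start from. Must be within given iterable.
--
--     Returns
--     -------
--     Iterable[tuple]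
--         An iterable with tuples of (element, element offset from the start)
--     """
--     if len(seq) == 0 or not (0 <= start < len(seq)):
--         return
--
--     yield seq[start], 0
--     offset = 0
--     while True:
--         if offset > 0:
--             offset = -offset  # pos -> neg
--             if start + offset < 0:
--                 return
--         else:
--             offset = -offset + 1  # neg -> pos + 1
--             if start + offset >= len(seq):
--                 return
--         yield seq[start + offset], offset
-- ===== SOURCE B (Python) =====
-- def iter_by_abs_idx(seq, start):
--     n = len(seq)
--     if not (0 <= start < n):
--         return
--     # window of indices the canonical enumeration actually reaches before the
--     # first out-of-bounds step: symmetric up to m = min(side capacities), plus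
--     # one extra index on the right when the right side is strictly longer
--     m = min(start, n - 1 - start)
--     hi = start + m + (1 if n - 1 - start > start else 0)
--     # sort the window indices by the canonical integer order of their offsets
--     for i in sorted(range(start - m, hi + 1),
--                     key=lambda i: 2 * abs(i - start) + (i < start)):
--         yield seq[i], i - start
-- ===== Notes on version B (the rewrite author's own statement) =====
-- stated objective: alternative
-- what changed: A's sign-flipping while-True state machine is replaced by a select-then-sort algorithm: compute up front the contiguous index window the enumeration reaches before its first out-of-bounds step, then sort those indices by the canonical-order key 2*|i-start| + (i<start) and emit (element, offset) pairs from the sorted window.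
import Mathlib
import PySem

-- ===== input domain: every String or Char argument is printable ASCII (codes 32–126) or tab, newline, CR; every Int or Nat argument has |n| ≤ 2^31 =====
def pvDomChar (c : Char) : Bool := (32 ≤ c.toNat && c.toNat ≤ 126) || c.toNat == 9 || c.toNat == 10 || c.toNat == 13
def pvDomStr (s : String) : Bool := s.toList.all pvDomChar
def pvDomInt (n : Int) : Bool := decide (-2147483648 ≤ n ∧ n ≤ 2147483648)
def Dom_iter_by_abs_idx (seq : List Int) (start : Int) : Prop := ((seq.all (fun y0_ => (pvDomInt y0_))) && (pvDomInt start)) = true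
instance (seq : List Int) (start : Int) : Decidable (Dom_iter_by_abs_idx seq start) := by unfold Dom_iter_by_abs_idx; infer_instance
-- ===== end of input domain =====

-- B replaces A's sign-flipping while-True offset state machine by a different algorithm:
-- select the contiguous index window the enumeration reaches, then sort it by the
-- canonical-order key 2*|i-start| + (i<start) (objective: alternative).


-- shared by both ports: Python's seq[i] on an index both programs only use in range
def pvGetI (seq : List Int) (i : Int) : Int := (PySem.List.pyGet? seq i).getD 0

-- ===== PORT A =====
-- the while-True loop; fuel only makes the same computation total (2*len+2 always suffices)
def pvLoopA (seq : List Int) (start : Int) (offset : Int) : Nat → List (Int × Int)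
  | 0 => []
  | fuel + 1 =>
    if offset > 0 then
      let o := -offset                    -- pos -> neg
      if start + o < 0 then []
      else (pvGetI seq (start + o), o) :: pvLoopA seq start o fuel
    else
      let o := -offset + 1                -- neg -> pos + 1
      if start + o ≥ (seq.length : Int) then []
      else (pvGetI seq (start + o), o) :: pvLoopA seq start o fuel

def iter_by_abs_idx (seq : List Int) (start : Int) : List (Int × Int) :=
  if seq.length = 0 ∨ ¬ (0 ≤ start ∧ start < (seq.length : Int)) then []
  else (pvGetI seq start, 0) :: pvLoopA seq start 0 (2 * seq.length + 2)

-- ===== PORT B =====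
-- select-then-sort: the window of reached indices, sorted by the canonical key
def iter_by_abs_idx_alt (seq : List Int) (start : Int) : List (Int × Int) :=
  let n : Int := seq.length
  if ¬ (0 ≤ start ∧ start < n) then []
  else
    let m := min start (n - 1 - start)
    let hi := start + m + (if n - 1 - start > start then 1 else 0)
    (PySem.List.sorted (PySem.List.pyRange (start - m) (hi + 1) 1)
        (fun i => 2 * |i - start| + (if i < start then 1 else 0)) false).map
      (fun i => (pvGetI seq i, i - start))

-- ===== PRECONDITION & SPEC =====
def Spec_iter_by_abs_idx (seq : List Int) (start : Int) (out : List (Int × Int)) : Prop := out = iter_by_abs_idx_alt seq start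
instance (seq : List Int) (start : Int) (out : List (Int × Int)) : Decidable (Spec_iter_by_abs_idx seq start out) := by unfold Spec_iter_by_abs_idx; infer_instance

-- ===== CLAIM (what is proved, stated in full; the proofs are below) =====
def Claim_equal_iter_by_abs_idx : Prop := ∀ (seq : List Int) (start : Int), Dom_iter_by_abs_idx seq start → Spec_iter_by_abs_idx seq start (iter_by_abs_idx seq start)

-- ===== LEMMAS AND PROOFS =====

-- the canonical index list: start, start+1, start-1, …, start+m, start-m
def pvCidx (start : Int) (m : Nat) : List Int :=
  start :: (PySem.List.pyRange 1 ((m : Int) + 1) 1).flatMap (fun k => [start + k, start - k])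

theorem pvCidx_succ (start : Int) (m : Nat) :
    pvCidx start (m + 1) =
      pvCidx start m ++ [start + ((m : Int) + 1), start - ((m : Int) + 1)] := by
  unfold pvCidx
  rw [show ((m + 1 : Nat) : Int) + 1 = ((m : Int) + 1) + 1 by push_cast; ring,
      PySem.List.pyRange_one_succ_right (by omega)]
  simp [List.flatMap_append]

-- the window is a permutation of the canonical list
theorem pvCidx_perm (start : Int) : ∀ (m : Nat),
    (PySem.List.pyRange (start - (m : Int)) (start + (m : Int) + 1) 1).Perm (pvCidx start m) := by
  intro m
  induction m with
  | zero =>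
      simp only [Nat.cast_zero, sub_zero, add_zero]
      rw [PySem.List.pyRange_one_singleton]
      unfold pvCidx
      rw [PySem.List.pyRange_one_eq_nil (by omega)]
      simp
  | succ m ih =>
      rw [pvCidx_succ]
      have hc : (PySem.List.pyRange (start - ((m + 1 : Nat) : Int)) (start + ((m + 1 : Nat) : Int) + 1) 1)
          = (start - ((m : Int) + 1)) ::
              (PySem.List.pyRange (start - (m : Int)) (start + (m : Int) + 1) 1
                ++ [start + (m : Int) + 1]) := by
        rw [show ((m + 1 : Nat) : Int) = (m : Int) + 1 by push_cast; ring]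
        rw [PySem.List.pyRange_one_cons (by omega)]
        rw [show start - ((m : Int) + 1) + 1 = start - (m : Int) by ring]
        rw [show start + ((m : Int) + 1) + 1 = (start + (m : Int) + 1) + 1 by ring]
        rw [PySem.List.pyRange_one_succ_right (by omega)]
      rw [hc]
      refine ((ih.append_right [start + (m : Int) + 1]).cons _).trans ?_
      refine ((List.perm_append_singleton _ _).symm).trans ?_
      have he : (pvCidx start m ++ [start + (m : Int) + 1]) ++ [start - ((m : Int) + 1)]
          = pvCidx start m ++ [start + ((m : Int) + 1), start - ((m : Int) + 1)] := by
        rw [List.append_assoc]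
        simp [show start + (m : Int) + 1 = start + ((m : Int) + 1) by ring]
      exact he ▸ List.Perm.refl _

-- every key in the canonical list is at most 2m+1
theorem pvCidx_key_le (start : Int) (m : Nat) (x : Int) (hx : x ∈ pvCidx start m) :
    2 * |x - start| + (if x < start then 1 else 0) ≤ 2 * (m : Int) + 1 := by
  unfold pvCidx at hx
  rcases List.mem_cons.mp hx with rfl | hx
  · simp
    omega
  · rcases List.mem_flatMap.mp hx with ⟨k, hk, hxk⟩
    have hk' := (PySem.List.mem_pyRange_one).mp hk
    rcases List.mem_cons.mp hxk with rfl | hxk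
    · rw [show start + k - start = k by ring,
          abs_of_nonneg (show (0:Int) ≤ k by omega),
          if_neg (show ¬ (start + k < start) by omega)]
      omega
    · rcases List.mem_singleton.mp hxk with rfl
      rw [show start - k - start = -k by ring, abs_neg,
          abs_of_nonneg (show (0:Int) ≤ k by omega),
          if_pos (show start - k < start by omega)]
      omega

-- the canonical list is strictly increasing under the key
theorem pvCidx_pairwise (start : Int) : ∀ (m : Nat),
    (pvCidx start m).Pairwise (fun a b =>
      2 * |a - start| + (if a < start then 1 else 0) <
      2 * |b - start| + (if b < start then 1 else 0)) := by
  intro m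
  induction m with
  | zero =>
      unfold pvCidx
      rw [PySem.List.pyRange_one_eq_nil (by omega)]
      simp
  | succ m ih =>
      rw [pvCidx_succ]
      refine List.pairwise_append.mpr ⟨ih, ?_, ?_⟩
      · refine List.pairwise_cons.mpr ⟨?_, by simp⟩
        intro b hb
        rcases List.mem_singleton.mp hb with rfl
        rw [show start + ((m : Int) + 1) - start = (m : Int) + 1 by ring,
            show start - ((m : Int) + 1) - start = -((m : Int) + 1) by ring,
            abs_neg, abs_of_nonneg (show (0:Int) ≤ (m : Int) + 1 by omega),
            if_neg (show ¬ (start + ((m : Int) + 1) < start) by omega),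
            if_pos (show start - ((m : Int) + 1) < start by omega)]
        omega
      · intro a ha b hb
        have hle := pvCidx_key_le start m a ha
        rcases List.mem_cons.mp hb with rfl | hb
        · rw [show start + ((m : Int) + 1) - start = (m : Int) + 1 by ring,
              abs_of_nonneg (show (0:Int) ≤ (m : Int) + 1 by omega),
              if_neg (show ¬ (start + ((m : Int) + 1) < start) by omega)]
          split_ifs at hle ⊢ <;> omega
        · rcases List.mem_singleton.mp hb with rfl
          rw [show start - ((m : Int) + 1) - start = -((m : Int) + 1) by ring,
              abs_neg, abs_of_nonneg (show (0:Int) ≤ (m : Int) + 1 by omega),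
              if_pos (show start - ((m : Int) + 1) < start by omega)]
          split_ifs at hle ⊢ <;> omega

-- A's loop, entered with offset = -k (0 ≤ k ≤ m), produces exactly the remaining canonical pairs.
theorem pvLoopA_eq (seq : List Int) (start : Int)
    (_h0 : 0 ≤ start) (_h1 : start < (seq.length : Int)) :
    ∀ (d : Nat) (k : Int), 0 ≤ k →
      k + d = min start ((seq.length : Int) - 1 - start) →
      ∀ fuel, 2 * d + 2 ≤ fuel →
      pvLoopA seq start (-k) fuel =
        ((PySem.List.pyRange (k + 1) (min start ((seq.length : Int) - 1 - start) + 1) 1).flatMap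
          (fun j => [(pvGetI seq (start + j), j), (pvGetI seq (start - j), -j)]))
        ++ (if (seq.length : Int) - 1 - start > start then
              [(pvGetI seq (start + min start ((seq.length : Int) - 1 - start) + 1),
                min start ((seq.length : Int) - 1 - start) + 1)]
            else []) := by
  intro d
  induction d with
  | zero =>
      intro k hk hkm fuel hfuel
      have hm : k = min start ((seq.length : Int) - 1 - start) := by omega
      obtain ⟨f, rfl⟩ : ∃ f, fuel = f + 2 := ⟨fuel - 2, by omega⟩
      rw [PySem.List.pyRange_one_eq_nil (by omega)]
      simp only [List.flatMap_nil, List.nil_append]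
      by_cases hgt : (seq.length : Int) - 1 - start > start
      · rw [if_pos hgt]
        show pvLoopA seq start (-k) (f + 1 + 1) = _
        rw [pvLoopA, if_neg (by omega), if_neg (by simp only [neg_neg]; omega)]
        rw [pvLoopA, if_pos (by simp only [neg_neg]; omega),
            if_pos (by simp only [neg_neg]; omega)]
        simp only [neg_neg]
        rw [hm]
        have h3 : start + (min start ((seq.length : Int) - 1 - start) + 1)
            = start + min start ((seq.length : Int) - 1 - start) + 1 := by ring
        rw [h3]
      · rw [if_neg hgt]
        show pvLoopA seq start (-k) (f + 1 + 1) = _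
        rw [pvLoopA, if_neg (by omega), if_pos (by simp only [neg_neg]; omega)]
  | succ d ih =>
      intro k hk hkm fuel hfuel
      obtain ⟨f, rfl⟩ : ∃ f, fuel = f + 2 := ⟨fuel - 2, by omega⟩
      show pvLoopA seq start (-k) (f + 1 + 1) = _
      rw [pvLoopA, if_neg (by omega), if_neg (by simp only [neg_neg]; omega)]
      rw [pvLoopA, if_pos (by simp only [neg_neg]; omega),
          if_neg (by simp only [neg_neg]; omega)]
      rw [PySem.List.pyRange_one_cons (by omega), List.flatMap_cons]
      simp only [neg_neg, List.cons_append, List.nil_append]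
      have h4 : start + -(k + 1) = start - (k + 1) := by ring
      have hrec := ih (k + 1) (by omega) (by omega) f (by omega)
      rw [h4, hrec]

-- ===== VERDICT (by name: the statement is the Claim_ definition above) =====
theorem iter_by_abs_idx_spec : Claim_equal_iter_by_abs_idx := by
  intro seq start _
  unfold Spec_iter_by_abs_idx iter_by_abs_idx iter_by_abs_idx_alt
  by_cases hg : (0 ≤ start ∧ start < (seq.length : Int))
  · obtain ⟨h0, h1⟩ := hg
    rw [if_neg (by simp only [not_or, not_not]; exact ⟨by omega, h0, h1⟩), if_neg (not_not_intro ⟨h0, h1⟩)]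
    simp only []
    set mI : Int := min start ((seq.length : Int) - 1 - start) with hmI
    have hm0 : 0 ≤ mI := by omega
    set mN : Nat := mI.toNat with hmN
    have hcast : (mN : Int) = mI := Int.toNat_of_nonneg hm0
    -- the sorted window equals the canonical index list (plus the extra index, if any)
    have hsorted :
        PySem.List.sorted
          (PySem.List.pyRange (start - mI)
            (start + mI + (if (seq.length : Int) - 1 - start > start then 1 else 0) + 1) 1)
          (fun i => 2 * |i - start| + (if i < start then 1 else 0)) false
        = pvCidx start mN ++
            (if (seq.length : Int) - 1 - start > start then [start + mI + 1] else []) := by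
      by_cases hgt : (seq.length : Int) - 1 - start > start
      · rw [if_pos hgt, if_pos hgt]
        have hsplit : PySem.List.pyRange (start - mI) (start + mI + 1 + 1) 1
            = PySem.List.pyRange (start - mI) (start + mI + 1) 1 ++ [start + mI + 1] :=
          PySem.List.pyRange_one_succ_right (by omega)
        rw [hsplit]
        refine PySem.List.sorted_eq_of_perm_of_pairwise_lt _ _
          (fun i => 2 * |i - start| + (if i < start then 1 else 0)) ?_ ?_
        · have := (pvCidx_perm start mN).symm
          rw [hcast] at this
          exact this.append_right [start + mI + 1]
        · refine List.pairwise_append.mpr ⟨pvCidx_pairwise start mN, by simp, ?_⟩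
          intro a ha b hb
          rcases List.mem_singleton.mp hb with rfl
          have hle := pvCidx_key_le start mN a ha
          rw [hcast] at hle
          beta_reduce
          rw [show start + mI + 1 - start = mI + 1 by ring,
              abs_of_nonneg (show (0:Int) ≤ mI + 1 by omega),
              if_neg (show ¬ (start + mI + 1 < start) by omega)]
          split_ifs at hle ⊢ <;> omega
      · rw [if_neg hgt, if_neg hgt]
        simp only [add_zero, List.append_nil]
        refine PySem.List.sorted_eq_of_perm_of_pairwise_lt _ _
          (fun i => 2 * |i - start| + (if i < start then 1 else 0)) ?_ (pvCidx_pairwise start mN)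
        have := (pvCidx_perm start mN).symm
        rw [hcast] at this
        exact this
    rw [hsorted]
    -- map the pairs over the canonical list
    have key := pvLoopA_eq seq start h0 h1 mN 0 (le_refl 0) (by omega)
      (2 * seq.length + 2) (by omega)
    simp only [neg_zero, zero_add, ← hmI] at key
    rw [key]
    unfold pvCidx
    rw [List.map_append, List.map_cons, List.map_flatMap]
    simp only [sub_self, add_sub_cancel_left, sub_sub_cancel_left, List.map_cons,
      List.map_nil, hcast, List.cons_append]
    congr 1
    by_cases hgt : (seq.length : Int) - 1 - start > start
    · rw [if_pos hgt, if_pos hgt]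
      simp [show start + mI + 1 - start = mI + 1 by ring]
    · rw [if_neg hgt, if_neg hgt]
      simp
  · rw [if_pos (Or.inr hg), if_pos hg]
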